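-- pv_equiv track=rewrite | github.com/brianstm/NUS | CS1010E/PE2/2223 S1/part 3.py | min_no_of_turns
-- ===== SOURCE A (Python) =====
-- def min_no_of_turns(L):
--     if not L:  # if the tuple is empty, no turn is needed
--         return 0
--     # Convert the tuple to a list and create a dictionary to count each integer
--     counts = {}
--     for num in L:
--         if num in counts:
--             counts[num] += 1
--         else:
--             counts[num] = 1
--     turns = 0  # Initialize the count of turns
--     # Iterate through the sorted keys of the dictionary
--     for num in sorted(counts.keys()):
--         # While the count of the current number is not 0
--         while counts[num] > 0:
--             # Reduce the count of each consecutive number by 1 in each turn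
--             i = num
--             while i in counts and counts[i] > 0:
--                 counts[i] -= 1
--                 i += 1
--             turns += 1  # Increment the count of turns
--
--     return turns
-- ===== SOURCE B (Python) =====
-- def min_no_of_turns(L):
--     counts = {}
--     for num in L:
--         counts[num] = counts.get(num, 0) + 1
--     total = 0
--     for v in sorted(counts):
--         prev = counts.get(v - 1, 0)
--         c = counts[v]
--         if c > prev:
--             total += c - prev
--     return total
-- ===== Notes on version B (the rewrite author's own statement) =====
-- stated objective: simpler
-- what changed: B replaces A's turn-by-turn simulation (repeatedly decrementing counts along consecutive runs until all reach zero) with a single pass over the sorted distinct values that sums max(0, count[v] - count[v-1]), the closed-form number of runs that must start at v.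
import Mathlib
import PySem

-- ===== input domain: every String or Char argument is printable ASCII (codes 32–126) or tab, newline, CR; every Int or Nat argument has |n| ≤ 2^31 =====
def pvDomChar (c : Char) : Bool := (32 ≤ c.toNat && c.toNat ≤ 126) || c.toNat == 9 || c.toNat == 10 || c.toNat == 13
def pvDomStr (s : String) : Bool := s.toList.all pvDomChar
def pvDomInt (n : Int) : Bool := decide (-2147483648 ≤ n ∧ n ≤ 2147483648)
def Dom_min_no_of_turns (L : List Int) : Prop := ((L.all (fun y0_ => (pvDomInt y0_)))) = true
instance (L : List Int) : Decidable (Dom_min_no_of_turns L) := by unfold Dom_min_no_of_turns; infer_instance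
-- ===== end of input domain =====

-- B replaces A's stroke-by-stroke simulation of removing consecutive runs by the closed-form
-- sum over sorted distinct values of max(0, count[v] - count[v-1]); same return value, proved below.

-- ===== PORT A =====
-- termination helper for the inner while loop (cited by name in decreasing_by)
theorem pvFilterGeStrict (l : List Int) (i : Int) (h : i ∈ l) :
    (l.filter (fun k => decide (i + 1 ≤ k))).length < (l.filter (fun k => decide (i ≤ k))).length := by
  rw [← List.countP_eq_length_filter, ← List.countP_eq_length_filter]
  rcases List.append_of_mem h with ⟨l1, l2, rfl⟩
  rw [List.countP_append, List.countP_append, List.countP_cons, List.countP_cons]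
  have h1 := List.countP_mono_left (l := l1) (p := fun k => decide (i + 1 ≤ k))
    (q := fun k => decide (i ≤ k)) (fun a _ hp => by simp at hp ⊢; omega)
  have h2 := List.countP_mono_left (l := l2) (p := fun k => decide (i + 1 ≤ k))
    (q := fun k => decide (i ≤ k)) (fun a _ hp => by simp at hp ⊢; omega)
  have e1 : (decide (i + 1 ≤ i) : Bool) = false := by simp
  have e2 : (decide (i ≤ i) : Bool) = true := by simp
  rw [e1, e2, if_neg (by simp : ¬ (false = true)), if_pos rfl]
  omega

-- inner while:  while i in counts and counts[i] > 0: counts[i] -= 1; i += 1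
def chainA (d : PySem.Dict Int Int) (i : Int) : PySem.Dict Int Int :=
  if h : (d.contains i = true) ∧ 0 < d.getD i 0 then
    chainA (d.insert i (d.getD i 0 - 1)) (i + 1)
  else d
termination_by (d.keys.filter (fun k => decide (i ≤ k))).length
decreasing_by
  rw [PySem.Dict.keys_insert_of_contains d (d.getD i 0 - 1) h.1]
  exact pvFilterGeStrict d.keys i ((PySem.Dict.contains_iff_mem_keys d i).mp h.1)

theorem chainA_getD_lt (d : PySem.Dict Int Int) (i w : Int) (hw : w < i) :
    (chainA d i).getD w 0 = d.getD w 0 := by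
  induction d, i using chainA.induct with
  | case1 d i h ih =>
    rw [chainA]; simp only [h, and_self, dif_pos]
    rw [ih (by omega)]
    exact PySem.Dict.getD_insert_of_ne _ _ _ (by omega)
  | case2 d i h => rw [chainA]; simp [h]

theorem chainA_getD_self (d : PySem.Dict Int Int) (num : Int) (h : 0 < d.getD num 0) :
    (chainA d num).getD num 0 = d.getD num 0 - 1 := by
  have hc : d.contains num = true := by
    rw [PySem.Dict.contains_eq_isSome_get?]
    rcases hg : d.get? num with _ | v
    · rw [PySem.Dict.getD_of_get?_eq_none d 0 hg] at h; omega
    · rfl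
  rw [chainA]; simp only [hc, h, and_self, dif_pos]
  rw [chainA_getD_lt _ _ _ (by omega)]
  exact PySem.Dict.getD_insert_self _ _ _ _

-- outer while at key num:  while counts[num] > 0: <inner chain>; turns += 1
def strokeA (d : PySem.Dict Int Int) (num : Int) : PySem.Dict Int Int × Int :=
  if h : 0 < d.getD num 0 then
    ((strokeA (chainA d num) num).1, (strokeA (chainA d num) num).2 + 1)
  else (d, 0)
termination_by (d.getD num 0).toNat
decreasing_by
  rw [chainA_getD_self d num h]; omega

def min_no_of_turns (L : List Int) : Int :=
  if L = [] then 0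
  else
    let counts := L.foldl (fun d num =>
      if d.contains num then d.insert num (d.getD num 0 + 1) else d.insert num 1)
      PySem.Dict.empty
    let res := (PySem.List.sorted counts.keys (fun x => x) false).foldl
      (fun (st : PySem.Dict Int Int × Int) num =>
        let r := strokeA st.1 num
        (r.1, st.2 + r.2)) (counts, 0)
    res.2

-- ===== PORT B =====
def min_no_of_turns_alt (L : List Int) : Int :=
  let counts := L.foldl (fun d num => d.insert num (d.getD num 0 + 1)) PySem.Dict.empty
  (PySem.List.sorted counts.keys (fun x => x) false).foldl
    (fun (total : Int) v =>
      if counts.getD (v - 1) 0 < counts.getD v 0 then total + (counts.getD v 0 - counts.getD (v - 1) 0)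
      else total) 0

-- ===== PRECONDITION & SPEC =====
def Spec_min_no_of_turns (L : List Int) (out : Int) : Prop := out = min_no_of_turns_alt L
instance (L : List Int) (out : Int) : Decidable (Spec_min_no_of_turns L out) := by unfold Spec_min_no_of_turns; infer_instance

-- ===== CLAIM (what is proved, stated in full; the proofs are below) =====
def Claim_equal_min_no_of_turns : Prop := ∀ (L : List Int), Dom_min_no_of_turns L → Spec_min_no_of_turns L (min_no_of_turns L)

-- ===== LEMMAS AND PROOFS =====

-- minimum of f over the integer interval [a..w] (= f a if w <= a)
def imin (f : Int → Int) (a w : Int) : Int :=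
  if a < w then min (imin f a (w - 1)) (f w) else f a
termination_by (w - a).toNat
decreasing_by omega

theorem imin_base (f : Int → Int) (a w : Int) (h : ¬ a < w) : imin f a w = f a := by
  rw [imin]; simp [h]

theorem imin_peel_right (f : Int → Int) (a w : Int) (h : a < w) :
    imin f a w = min (imin f a (w - 1)) (f w) := by
  rw [imin]; simp [h]

theorem imin_peel_left (f : Int → Int) (a w : Int) (h : a < w) :
    imin f a w = min (f a) (imin f (a + 1) w) := by
  have H : ∀ n : ℕ, ∀ w, (w - a).toNat = n → a < w →
      imin f a w = min (f a) (imin f (a + 1) w) := by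
    intro n
    induction n with
    | zero => intro w hn hlt; omega
    | succ m ih =>
      intro w hn hlt
      by_cases h2 : a < w - 1
      · rw [imin_peel_right f a w hlt, ih (w-1) (by omega) h2,
          imin_peel_right f (a+1) w (by omega), min_assoc]
      · have hw : w = a + 1 := by omega
        subst hw
        rw [imin_peel_right f a (a+1) hlt, imin_base f a (a+1-1) (by omega),
          imin_base f (a+1) (a+1) (by omega)]
  exact H (w - a).toNat w rfl h

theorem imin_le (f : Int → Int) (a u w : Int) (h1 : a ≤ u) (h2 : u ≤ w) :
    imin f a w ≤ f u := by
  have H : ∀ n : ℕ, ∀ w u, (w - a).toNat = n → a ≤ u → u ≤ w → imin f a w ≤ f u := by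
    intro n
    induction n with
    | zero =>
      intro w u hn hau huw
      have h3 : ¬ a < w := by omega
      have h4 : u = a := by omega
      rw [h4, imin_base f a w h3]
    | succ m ih =>
      intro w u hn hau huw
      have hlt : a < w := by omega
      rw [imin_peel_right f a w hlt]
      by_cases hu : u ≤ w - 1
      · exact le_trans (min_le_left _ _) (ih (w-1) u (by omega) hau hu)
      · have : u = w := by omega
        subst this
        exact min_le_right _ _
  exact H (w - a).toNat w u rfl h1 h2

theorem imin_nonneg (f : Int → Int) (a w : Int) (hf : ∀ u, 0 ≤ f u) : 0 ≤ imin f a w := by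
  have H : ∀ n : ℕ, ∀ w, (w - a).toNat = n → 0 ≤ imin f a w := by
    intro n
    induction n with
    | zero =>
      intro w hn
      by_cases hlt : a < w
      · omega
      · rw [imin_base f a w hlt]; exact hf a
    | succ m ih =>
      intro w hn
      by_cases hlt : a < w
      · rw [imin_peel_right f a w hlt]
        exact le_min (ih (w-1) (by omega)) (hf w)
      · rw [imin_base f a w hlt]; exact hf a
  exact H (w - a).toNat w rfl

theorem imin_congr (f g : Int → Int) (a w : Int) (ha : a ≤ w)
    (h : ∀ u, a ≤ u → u ≤ w → f u = g u) : imin f a w = imin g a w := by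
  have H : ∀ n : ℕ, ∀ w, (w - a).toNat = n → a ≤ w → (∀ u, a ≤ u → u ≤ w → f u = g u) →
      imin f a w = imin g a w := by
    intro n
    induction n with
    | zero =>
      intro w hn hw hfw
      have hlt : ¬ a < w := by omega
      rw [imin_base f a w hlt, imin_base g a w hlt, hfw a (le_refl a) hw]
    | succ m ih =>
      intro w hn hw hfw
      have hlt : a < w := by omega
      rw [imin_peel_right f a w hlt, imin_peel_right g a w hlt,
        ih (w-1) (by omega) (by omega) (fun u hu1 hu2 => hfw u hu1 (by omega)),
        hfw w (by omega) (le_refl w)]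
  exact H (w - a).toNat w rfl ha h

theorem imin_mono_left (f : Int → Int) (b a w : Int) (hba : b ≤ a) (haw : a ≤ w) :
    imin f b w ≤ imin f a w := by
  have H : ∀ n : ℕ, ∀ b, (a - b).toNat = n → b ≤ a → imin f b w ≤ imin f a w := by
    intro n
    induction n with
    | zero => intro b hn hba'; have : b = a := by omega
              subst this; exact le_refl _
    | succ m ih =>
      intro b hn hba'
      have hlt : b < a := by omega
      rw [imin_peel_left f b w (by omega)]
      exact le_trans (min_le_right _ _) (ih (b+1) (by omega) (by omega))
  exact H (a - b).toNat b rfl hba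

-- nonnegative dict values
def NonnegD (d : PySem.Dict Int Int) : Prop := ∀ w, 0 ≤ d.getD w 0

-- the effect of one inner chain pass on every entry
theorem chainA_getD (d : PySem.Dict Int Int) (i : Int) :
    NonnegD d → ∀ w, (chainA d i).getD w 0 =
      d.getD w 0 - (if i ≤ w ∧ 0 < imin (fun u => d.getD u 0) i w then 1 else 0) := by
  induction d, i using chainA.induct with
  | case1 d i h ih =>
    intro hn w
    have hd' : NonnegD (d.insert i (d.getD i 0 - 1)) := by
      intro u
      rw [PySem.Dict.getD_insert]
      split_ifs
      · omega
      · exact hn u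
    rw [chainA, dif_pos h]
    rw [ih hd' w]
    have hdw : ∀ u : Int, (d.insert i (d.getD i 0 - 1)).getD u 0 =
        if u = i then d.getD i 0 - 1 else d.getD u 0 := by
      intro u; rw [PySem.Dict.getD_insert]
    rcases lt_trichotomy w i with hw | hw | hw
    · rw [if_neg (by omega : ¬ (i + 1 ≤ w ∧ 0 < imin (fun u => (d.insert i (d.getD i 0 - 1)).getD u 0) (i+1) w)),
        if_neg (by omega : ¬ (i ≤ w ∧ 0 < imin (fun u => d.getD u 0) i w))]
      rw [hdw w, if_neg (by omega)]
    · subst hw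
      rw [if_neg (by omega : ¬ (w + 1 ≤ w ∧ 0 < imin (fun u => (d.insert w (d.getD w 0 - 1)).getD u 0) (w+1) w))]
      rw [if_pos ⟨le_refl w, by rw [imin_base _ _ _ (by omega)]; exact h.2⟩]
      rw [hdw w, if_pos rfl]
      omega
    · have hcongr : imin (fun u => (d.insert i (d.getD i 0 - 1)).getD u 0) (i+1) w
          = imin (fun u => d.getD u 0) (i+1) w := by
        apply imin_congr _ _ _ _ (by omega)
        intro u hu1 _
        rw [hdw u, if_neg (by omega)]
      rw [hcongr, hdw w, if_neg (by omega)]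
      have hpl : imin (fun u => d.getD u 0) i w
          = min (d.getD i 0) (imin (fun u => d.getD u 0) (i+1) w) := imin_peel_left _ _ _ hw
      have hiff : (i + 1 ≤ w ∧ 0 < imin (fun u => d.getD u 0) (i+1) w)
          ↔ (i ≤ w ∧ 0 < imin (fun u => d.getD u 0) i w) := by
        rw [hpl]
        have := h.2
        constructor
        · rintro ⟨h1, h2⟩; exact ⟨by omega, by omega⟩
        · rintro ⟨h1, h2⟩; exact ⟨by omega, by omega⟩
      rw [if_congr hiff rfl rfl]
  | case2 d i h =>
    intro hn w
    rw [chainA, dif_neg h]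
    have hzero : d.getD i 0 = 0 := by
      rcases hcon : d.contains i with _ | _
      · exact PySem.Dict.getD_of_not_contains d 0 hcon
      · have h2 : ¬ 0 < d.getD i 0 := fun hb => h ⟨hcon, hb⟩
        have := hn i
        omega
    rw [if_neg]
    · omega
    · rintro ⟨h1, h2⟩
      have := imin_le (fun u => d.getD u 0) i i w (le_refl i) h1
      simp only [hzero] at this
      omega

theorem chainA_nonneg (d : PySem.Dict Int Int) (i : Int) (hn : NonnegD d) :
    NonnegD (chainA d i) := by
  intro w
  rw [chainA_getD d i hn w]
  split_ifs with h
  · have := imin_le (fun u => d.getD u 0) i w w h.1 (le_refl w)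
    have h2 := h.2
    simp only at this
    omega
  · have := hn w; omega

-- pure arithmetic core: subtracting the positive-prefix indicator lowers the running min by one where positive
theorem imin_sub_indicator (f : Int → Int) (v w : Int) (hv : v ≤ w) (hf : ∀ u, 0 ≤ f u) :
    imin (fun u => f u - (if v ≤ u ∧ 0 < imin f v u then 1 else 0)) v w
      = imin f v w - (if 0 < imin f v w then 1 else 0) := by
  have H : ∀ n : ℕ, ∀ w, (w - v).toNat = n → v ≤ w →
      imin (fun u => f u - (if v ≤ u ∧ 0 < imin f v u then 1 else 0)) v w
        = imin f v w - (if 0 < imin f v w then 1 else 0) := by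
    intro n
    induction n with
    | zero =>
      intro w hn hvw
      have hwv : w = v := by omega
      rw [hwv]
      rw [imin_base (fun u => f u - (if v ≤ u ∧ 0 < imin f v u then 1 else 0)) v v (lt_irrefl v),
        imin_base f v v (lt_irrefl v)]
      simp only [le_refl, true_and]
    | succ m ih =>
      intro w hn hvw
      have hlt : v < w := by omega
      rw [imin_peel_right (fun u => f u - (if v ≤ u ∧ 0 < imin f v u then 1 else 0)) v w hlt,
        imin_peel_right f v w hlt, ih (w-1) (by omega) (by omega)]
      have h0P : 0 ≤ imin f v (w - 1) := imin_nonneg f v (w-1) hf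
      have h0x : 0 ≤ f w := hf w
      simp only [hvw, true_and]
      split_ifs <;> omega
  exact H (w - v).toNat w rfl hv

-- the effect of the whole outer while loop at key num
theorem strokeA_getD (d : PySem.Dict Int Int) (num : Int) :
    NonnegD d → ∀ w, ((strokeA d num).1).getD w 0 =
      d.getD w 0 - (if num ≤ w then imin (fun u => d.getD u 0) num w else 0) := by
  induction d using strokeA.induct (num := num) with
  | case1 d h ih =>
    intro hn w
    have hnc := chainA_nonneg d num hn
    rw [strokeA, dif_pos h]
    rw [ih hnc w]
    by_cases hw : num ≤ w
    · rw [if_pos hw, if_pos hw]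
      have e1 : imin (fun u => (chainA d num).getD u 0) num w
          = imin (fun u => d.getD u 0 - (if num ≤ u ∧ 0 < imin (fun x => d.getD x 0) num u then 1 else 0)) num w := by
        apply imin_congr _ _ _ _ hw
        intro u _ _
        exact chainA_getD d num hn u
      rw [e1, imin_sub_indicator _ num w hw hn, chainA_getD d num hn w]
      simp only [hw, true_and]
      split_ifs <;> omega
    · rw [if_neg hw, if_neg hw, chainA_getD d num hn w,
        if_neg (fun hq => hw hq.1)]
      omega
  | case2 d h =>
    intro hn w
    rw [strokeA, dif_neg h]
    have hfst : ((d, (0:Int)).1) = d := rfl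
    rw [hfst]
    split_ifs with hw
    · have h1 : d.getD num 0 = 0 := by have := hn num; omega
      have h2 := imin_le (fun u => d.getD u 0) num num w (le_refl num) hw
      have h3 := imin_nonneg (fun u => d.getD u 0) num w hn
      simp only [h1] at h2
      omega
    · omega

theorem strokeA_turns (d : PySem.Dict Int Int) (num : Int) :
    NonnegD d → (strokeA d num).2 = d.getD num 0 := by
  induction d using strokeA.induct (num := num) with
  | case1 d h ih =>
    intro hn
    have hnc := chainA_nonneg d num hn
    rw [strokeA, dif_pos h]
    rw [ih hnc]
    rw [chainA_getD d num hn num]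
    rw [if_pos ⟨le_refl num, by rw [imin_base _ _ _ (by omega)]; exact h⟩]
    omega
  | case2 d h =>
    intro hn
    rw [strokeA, dif_neg h]
    have := hn num
    omega

theorem strokeA_nonneg (d : PySem.Dict Int Int) (num : Int) (hn : NonnegD d) :
    NonnegD (strokeA d num).1 := by
  intro w
  rw [strokeA_getD d num hn w]
  split_ifs with hw
  · have := imin_le (fun u => d.getD u 0) num w w hw (le_refl w)
    simp only at this
    omega
  · have := hn w; omega

-- running-min difference identity
theorem imin_sub_imin (f : Int → Int) (b v w : Int) (hb : b ≤ v) (hv : v ≤ w) :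
    imin (fun u => f u - imin f b u) v w = imin f v w - imin f b w := by
  have H : ∀ n : ℕ, ∀ w, (w - v).toNat = n → v ≤ w →
      imin (fun u => f u - imin f b u) v w = imin f v w - imin f b w := by
    intro n
    induction n with
    | zero =>
      intro w hn hvw
      have hwv : w = v := by omega
      rw [hwv, imin_base (fun u => f u - imin f b u) v v (lt_irrefl v), imin_base f v v (lt_irrefl v)]
    | succ m ih =>
      intro w hn hvw
      have hlt : v < w := by omega
      rw [imin_peel_right (fun u => f u - imin f b u) v w hlt, imin_peel_right f v w hlt,
        imin_peel_right f b w (by omega),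
        ih (w-1) (by omega) (by omega)]
      have hQP := imin_mono_left f b v (w-1) hb (by omega)
      omega
  exact H (w - v).toNat w rfl hv

-- main loop invariant: folding strokeA over the sorted keys yields B's closed-form sum
theorem foldA_eq (c : PySem.Dict Int Int) (hc : NonnegD c) :
    ∀ (ks : List Int) (d : PySem.Dict Int Int) (b t : Int),
      ks.Pairwise (· < ·) →
      (∀ x ∈ ks, b < x) →
      (∀ u, b < u → c.getD u 0 ≠ 0 → u ∈ ks) →
      (∀ w, b < w → d.getD w 0 = c.getD w 0 - imin (fun u => c.getD u 0) b w) →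
      NonnegD d →
      (ks.foldl (fun (st : PySem.Dict Int Int × Int) num =>
          let r := strokeA st.1 num
          (r.1, st.2 + r.2)) (d, t)).2
        = ks.foldl (fun total v =>
            if c.getD (v - 1) 0 < c.getD v 0 then total + (c.getD v 0 - c.getD (v - 1) 0)
            else total) t := by
  intro ks
  induction ks with
  | nil => intro d b t _ _ _ _ _; rfl
  | cons v0 rest ih =>
    intro d b t hp hb hcomp hinv hnd
    have hbv0 : b < v0 := hb v0 (List.mem_cons_self)
    have hprest := (List.pairwise_cons.mp hp).2
    have hv0lt : ∀ x ∈ rest, v0 < x := (List.pairwise_cons.mp hp).1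
    simp only [List.foldl_cons]
    have hturn : (strokeA d v0).2 = c.getD v0 0 - imin (fun u => c.getD u 0) b v0 := by
      rw [strokeA_turns d v0 hnd, hinv v0 hbv0]
    -- the stroke count at v0 equals B's summand
    have hstep : t + (strokeA d v0).2
        = (if c.getD (v0 - 1) 0 < c.getD v0 0 then t + (c.getD v0 0 - c.getD (v0 - 1) 0) else t) := by
      rw [hturn]
      by_cases hadj : v0 = b + 1
      · have e1 : imin (fun u => c.getD u 0) b v0
            = min (c.getD b 0) (c.getD v0 0) := by
          rw [imin_peel_right _ _ _ (by omega), imin_base _ _ _ (by omega)]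
        have e2 : c.getD (v0 - 1) 0 = c.getD b 0 := by
          have : v0 - 1 = b := by omega
          rw [this]
        rw [e1, e2]
        split_ifs <;> omega
      · have h1 : c.getD (b + 1) 0 = 0 := by
          by_contra hne
          rcases List.mem_cons.mp (hcomp (b+1) (by omega) hne) with he | he
          · omega
          · have := hv0lt _ he; omega
        have h2 : c.getD (v0 - 1) 0 = 0 := by
          by_contra hne
          rcases List.mem_cons.mp (hcomp (v0 - 1) (by omega) hne) with he | he
          · omega
          · have := hv0lt _ he; omega
        have h3 : imin (fun u => c.getD u 0) b v0 = 0 := by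
          have hle := imin_le (fun u => c.getD u 0) b (b+1) v0 (by omega) (by omega)
          have hge := imin_nonneg (fun u => c.getD u 0) b v0 hc
          simp only [h1] at hle
          omega
        have h4 := hc v0
        rw [h2, h3]
        split_ifs <;> omega
    rw [ih (strokeA d v0).1 v0 (t + (strokeA d v0).2) hprest hv0lt
      (fun u hu hcu => by
        rcases List.mem_cons.mp (hcomp u (by omega) hcu) with he | he
        · omega
        · exact he)
      (fun w hw => by
        rw [strokeA_getD d v0 hnd w, if_pos (by omega : v0 ≤ w), hinv w (by omega)]
        have hcongr : imin (fun u => d.getD u 0) v0 w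
            = imin (fun u => c.getD u 0 - imin (fun x => c.getD x 0) b u) v0 w := by
          apply imin_congr _ _ _ _ (by omega)
          intro u hu1 _
          exact hinv u (by omega)
        rw [hcongr, imin_sub_imin (fun u => c.getD u 0) b v0 w (by omega) (by omega)]
        ring)
      (strokeA_nonneg d v0 hnd)]
    rw [hstep]

-- ===== VERDICT (by name: the statement is the Claim_ definition above) =====
theorem pvCountFunEq :
    (fun (d : PySem.Dict Int Int) (num : Int) =>
        if d.contains num then d.insert num (d.getD num 0 + 1) else d.insert num 1)
      = (fun (d : PySem.Dict Int Int) (num : Int) => d.insert num (d.getD num 0 + 1)) := by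
  funext d num
  rcases hc : d.contains num with _ | _
  · rw [if_neg (by simp), PySem.Dict.getD_of_not_contains d 0 hc]
    norm_num
  · rw [if_pos (by simp)]

theorem min_no_of_turns_spec : Claim_equal_min_no_of_turns := by
  intro L _
  unfold Spec_min_no_of_turns
  by_cases hL : L = []
  · subst hL; decide
  · simp only [min_no_of_turns, min_no_of_turns_alt, pvCountFunEq, if_neg hL]
    set c := L.foldl (fun (d : PySem.Dict Int Int) (num : Int) =>
      d.insert num (d.getD num 0 + 1)) PySem.Dict.empty with hcdef
    have hgetD : ∀ v : Int, c.getD v 0 = (L.count v : Int) := by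
      intro v
      rw [hcdef, PySem.Dict.getD_foldl_insert_add_one, PySem.Dict.getD_empty]
      omega
    have hkeys : c.keys = PySem.Set.ofList L := by
      rw [hcdef, PySem.Dict.keys_foldl_insert L (fun d x => d.getD x 0 + 1) PySem.Dict.empty,
        PySem.Dict.keys_empty, PySem.Set.update_nil_left]
    have hnn : NonnegD c := by
      intro w
      rw [hgetD w]
      exact Int.natCast_nonneg _
    have hmem : ∀ u : Int, c.getD u 0 ≠ 0 → u ∈ PySem.List.sorted c.keys (fun x => x) false := by
      intro u hu
      rw [PySem.List.mem_sorted, hkeys, PySem.Set.mem_ofList]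
      rw [hgetD u] at hu
      have hcount : L.count u ≠ 0 := by exact_mod_cast hu
      exact List.count_pos_iff.mp (Nat.pos_of_ne_zero hcount)
    rcases hks : PySem.List.sorted c.keys (fun x => x) false with _ | ⟨v0, rest⟩
    · exfalso
      rcases List.exists_mem_of_ne_nil L hL with ⟨x, hx⟩
      have hxc : c.getD x 0 ≠ 0 := by
        rw [hgetD x]
        have := List.count_pos_iff.mpr hx
        omega
      have := hmem x hxc
      rw [hks] at this
      exact List.not_mem_nil this
    · have hpair : (v0 :: rest).Pairwise (· < ·) := by
        rw [← hks, hkeys]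
        exact PySem.List.sorted_ofList_pairwise_lt L
      have hv0min : ∀ x ∈ v0 :: rest, v0 - 1 < x := by
        intro x hx
        rcases List.mem_cons.mp hx with rfl | hx2
        · omega
        · have := (List.pairwise_cons.mp hpair).1 x hx2; omega
      apply foldA_eq c hnn (v0 :: rest) c (v0 - 1) 0 hpair hv0min
      · intro u _ hu
        have := hmem u hu
        rw [hks] at this
        exact this
      · intro w hw
        have hb0 : c.getD (v0 - 1) 0 = 0 := by
          by_contra hne
          have := hmem (v0 - 1) hne
          rw [hks] at this
          have := hv0min _ this
          omega
        have h1 := imin_le (fun u => c.getD u 0) (v0 - 1) (v0 - 1) w (le_refl _) (by omega)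
        have h2 := imin_nonneg (fun u => c.getD u 0) (v0 - 1) w hnn
        simp only [hb0] at h1
        omega
      · exact hnn
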